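-- pv_equiv track=rewrite | github.com/arubique/stnd | stnd/utility/utils.py | range_for_each_group
-- ===== SOURCE A (Python) =====
-- def range_for_each_group(num_groups, num_elements):
--     assert num_elements >= num_groups
--
--     indices_per_group = int(num_elements / num_groups)
--     remainder = num_elements % num_groups
--
--     return [
--         (
--             group_id * indices_per_group + (min(group_id, remainder)),
--             (group_id + 1) * (indices_per_group)
--             + (min(group_id, remainder - 1) + 1),
--         )
--         for group_id in range(num_groups)
--     ]
-- ===== SOURCE B (Python) =====
-- def range_for_each_group(num_groups, num_elements):
--     assert num_elements >= num_groups
--     indices_per_group = num_elements // num_groups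
--     remainder = num_elements % num_groups
--     result = []
--     cursor = 0
--     for group_id in range(num_groups):
--         size = indices_per_group + 1 if group_id < remainder else indices_per_group
--         result.append((cursor, cursor + size))
--         cursor += size
--     return result
-- ===== Notes on version B (the rewrite author's own statement) =====
-- stated objective: alternative
-- what changed: B threads a running cursor (start index) through one accumulating loop, appending (cursor, cursor+size) and advancing it, instead of A's per-group closed-form arithmetic with min(group_id, remainder) inside a comprehension; it also uses integer floor division where A truncates a float quotient (identical for the positive quotients the precondition admits).
import Mathlib
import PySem

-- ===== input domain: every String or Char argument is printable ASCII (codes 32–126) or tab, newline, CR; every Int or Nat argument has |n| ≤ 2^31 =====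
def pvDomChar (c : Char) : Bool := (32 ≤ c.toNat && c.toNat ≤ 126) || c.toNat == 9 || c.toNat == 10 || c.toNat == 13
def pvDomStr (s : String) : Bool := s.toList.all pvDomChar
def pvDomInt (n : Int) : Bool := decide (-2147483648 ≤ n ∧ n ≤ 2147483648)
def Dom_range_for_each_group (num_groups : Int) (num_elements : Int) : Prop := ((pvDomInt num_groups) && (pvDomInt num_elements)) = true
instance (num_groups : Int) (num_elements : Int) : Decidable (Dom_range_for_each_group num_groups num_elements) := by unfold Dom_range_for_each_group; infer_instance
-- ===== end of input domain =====

-- B replaces A's per-group closed-form arithmetic (min(group_id, remainder)) by one loop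
-- threading a running cursor; objective: alternative decomposition, same O(n) cost.

-- ===== PORT A =====
-- int(num_elements / num_groups) is float true division truncated toward zero; for |n| ≤ 2^31
-- the float quotient can never round across an integer, so it is exactly Int.tdiv here.
def range_for_each_group (num_groups : Int) (num_elements : Int) : List (Int × Int) :=
  let indices_per_group : Int := num_elements.tdiv num_groups
  let remainder : Int := PySem.Int.mod num_elements num_groups
  (PySem.List.pyRange 0 num_groups 1).map (fun group_id =>
    (group_id * indices_per_group + min group_id remainder,
     (group_id + 1) * indices_per_group + (min group_id (remainder - 1) + 1)))

-- ===== PORT B =====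
def range_for_each_group_alt (num_groups : Int) (num_elements : Int) : List (Int × Int) :=
  let indices_per_group : Int := PySem.Int.floordiv num_elements num_groups
  let remainder : Int := PySem.Int.mod num_elements num_groups
  ((PySem.List.pyRange 0 num_groups 1).foldl
    (fun (st : List (Int × Int) × Int) group_id =>
      let size : Int := if group_id < remainder then indices_per_group + 1 else indices_per_group
      (st.1 ++ [(st.2, st.2 + size)], st.2 + size)) ([], 0)).1

-- ===== PRECONDITION & SPEC =====
-- Pre_ excludes exactly where A raises: num_groups = 0 (ZeroDivisionError) and
-- num_elements < num_groups (the assert fails).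
def Pre_range_for_each_group (num_groups : Int) (num_elements : Int) : Prop :=
  num_groups ≠ 0 ∧ num_groups ≤ num_elements
instance (num_groups : Int) (num_elements : Int) : Decidable (Pre_range_for_each_group num_groups num_elements) := by unfold Pre_range_for_each_group; infer_instance
def pvWitness_range_for_each_group : Int × Int := (3, 10)

def Spec_range_for_each_group (num_groups : Int) (num_elements : Int) (out : List (Int × Int)) : Prop := out = range_for_each_group_alt num_groups num_elements
instance (num_groups : Int) (num_elements : Int) (out : List (Int × Int)) : Decidable (Spec_range_for_each_group num_groups num_elements out) := by unfold Spec_range_for_each_group; infer_instance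

-- ===== CLAIM (what is proved, stated in full; the proofs are below) =====
def Claim_equal_range_for_each_group : Prop := ∀ (num_groups : Int) (num_elements : Int), Dom_range_for_each_group num_groups num_elements → Pre_range_for_each_group num_groups num_elements → Spec_range_for_each_group num_groups num_elements (range_for_each_group num_groups num_elements)

-- ===== LEMMAS AND PROOFS =====

-- B's cursor loop, run from any start group `lo` with cursor value `lo*ipg + min lo rem`,
-- appends exactly A's closed-form tuples for groups lo, lo+1, …, n-1.
theorem cursor_fold_eq (ipg rem : Int) (n : Int) :
    ∀ (k : Nat) (lo : Int) (acc : List (Int × Int)), 0 ≤ lo → lo + k = n →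
      (PySem.List.pyRange lo n 1).foldl
        (fun (st : List (Int × Int) × Int) g =>
          let size : Int := if g < rem then ipg + 1 else ipg
          (st.1 ++ [(st.2, st.2 + size)], st.2 + size)) (acc, lo * ipg + min lo rem)
      = (acc ++ (PySem.List.pyRange lo n 1).map (fun g =>
            (g * ipg + min g rem, (g + 1) * ipg + (min g (rem - 1) + 1))),
         n * ipg + min n rem) := by
  intro k
  induction k with
  | zero =>
      intro lo acc _ hlo
      have hn : n = lo := by omega
      rw [PySem.List.pyRange_one_eq_nil (by omega)]
      simp [hn]
  | succ k ih =>
      intro lo acc hlo0 hlo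
      have hlt : lo < n := by omega
      rw [PySem.List.pyRange_one_cons hlt]
      simp only [List.foldl_cons, List.map_cons]
      by_cases hc : lo < rem
      · have h1 : min lo rem = lo := min_eq_left (by omega)
        have h2 : min (lo + 1) rem = lo + 1 := min_eq_left (by omega)
        have h3 : min lo (rem - 1) = lo := min_eq_left (by omega)
        have hstep : lo * ipg + min lo rem + (ipg + 1) = (lo + 1) * ipg + min (lo + 1) rem := by
          rw [h1, h2]; ring
        simp only [hc, if_pos]
        rw [hstep, ih (lo + 1) _ (by omega) (by omega)]
        rw [h1, h2, h3]
        simp only [List.append_assoc, List.singleton_append]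
      · have hge : rem ≤ lo := by omega
        have h1 : min lo rem = rem := min_eq_right hge
        have h2 : min (lo + 1) rem = rem := min_eq_right (by omega)
        have h3 : min lo (rem - 1) = rem - 1 := min_eq_right (by omega)
        have hstep : lo * ipg + min lo rem + ipg = (lo + 1) * ipg + min (lo + 1) rem := by
          rw [h1, h2]; ring
        simp only [hc, if_false]
        rw [hstep, ih (lo + 1) _ (by omega) (by omega)]
        rw [h1, h2, h3, show rem - 1 + 1 = rem from by ring]
        simp only [List.append_assoc, List.singleton_append]

-- ===== VERDICT (by name: the statement is the Claim_ definition above) =====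
theorem range_for_each_group_spec : Claim_equal_range_for_each_group := by
  intro ng ne _ hpre
  obtain ⟨hne0, hle⟩ := hpre
  unfold Spec_range_for_each_group
  simp only [range_for_each_group, range_for_each_group_alt]
  rcases lt_or_gt_of_ne hne0 with hneg | hpos
  · -- ng < 0: range(ng) is empty on both sides
    rw [PySem.List.pyRange_one_eq_nil (by omega)]
    simp
  · -- ng > 0: tdiv = floordiv (both operands positive), mod is nonnegative
    have hdiv : ne.tdiv ng = PySem.Int.floordiv ne ng := by
      rw [PySem.Int.floordiv_eq_ediv_of_pos hpos,
          Int.tdiv_eq_ediv_of_nonneg (by omega)]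
    have hmod : PySem.Int.mod ne ng = ne % ng := PySem.Int.mod_eq_emod_of_pos hpos
    have hrem : 0 ≤ PySem.Int.mod ne ng := by rw [hmod]; exact Int.emod_nonneg ne (by omega)
    rw [hdiv]
    set ipg := PySem.Int.floordiv ne ng with hipg
    set rem := PySem.Int.mod ne ng with hremdef
    have h0 : (0 : Int) = 0 * ipg + min 0 rem := by
      rw [min_eq_left hrem]; ring
    conv_rhs => rw [show (([], 0) : List (Int × Int) × Int) = ([], 0 * ipg + min 0 rem) by rw [← h0]]
    rw [cursor_fold_eq ipg rem ng ng.toNat 0 [] (le_refl 0) (by omega)]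
    simp
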